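-- pv_equiv track=rewrite | github.com/gauthierbeaudoux/LeetCode | 1725_Nber_Rectangles.py | countGoodRectangles
-- ===== SOURCE A (Python) =====
-- rectangles = [[2,3],[3,7],[4,3],[3,7]]
--
-- def countGoodRectangles(rectangles: list[list[int]]) -> int:
--     max_len = -1
--     for i in rectangles:
--         taille_carre = min(i)
--         if taille_carre > max_len:
--             max_len = taille_carre
--             total = 1
--         elif taille_carre == max_len:
--             total += 1
--     return total
-- ===== SOURCE B (Python) =====
-- def countGoodRectangles(rectangles: list[list[int]]) -> int:
--     sides = [min(r) for r in rectangles]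
--     m = max(sides)
--     return sides.count(m)
-- ===== Notes on version B (the rewrite author's own statement) =====
-- stated objective: simpler
-- what changed: Replaces the fused running-max-and-count loop with unbound-variable state by three separate passes: build the list of square sides, take its max, count occurrences of the max.
-- outside the precondition, e.g. on countGoodRectangles([]): A raises UnboundLocalError, B raises ValueError
import Mathlib
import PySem

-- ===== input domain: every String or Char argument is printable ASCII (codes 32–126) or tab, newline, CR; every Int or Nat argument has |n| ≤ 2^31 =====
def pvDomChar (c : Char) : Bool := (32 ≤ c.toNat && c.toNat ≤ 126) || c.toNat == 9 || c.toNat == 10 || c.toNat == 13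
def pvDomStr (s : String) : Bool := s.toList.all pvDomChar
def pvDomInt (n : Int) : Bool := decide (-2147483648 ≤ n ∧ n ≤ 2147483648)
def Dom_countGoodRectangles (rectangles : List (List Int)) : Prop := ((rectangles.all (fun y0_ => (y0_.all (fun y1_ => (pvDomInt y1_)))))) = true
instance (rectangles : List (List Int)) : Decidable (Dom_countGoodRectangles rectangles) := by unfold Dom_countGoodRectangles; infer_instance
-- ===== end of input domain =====

-- B replaces A's single fused max-and-count scan (with its unbound 'total') by three
-- separate passes: per-rectangle sides, then max, then count — simpler decomposition.

-- ===== PORT A =====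
-- 'total' is unbound until the first branch fires: modelled as Option Int (none = unbound);
-- min([]) raises in Python: modelled with .getD 0, excluded by Pre_.
def countGoodRectangles (rectangles : List (List Int)) : Int :=
  let fin := rectangles.foldl
    (fun (st : Int × Option Int) i =>
      let taille_carre := (PySem.List.min? i (fun x => x)).getD 0
      if taille_carre > st.1 then (taille_carre, some 1)
      else if taille_carre = st.1 then (st.1, st.2.map (· + 1))
      else st)
    (-1, none)
  fin.2.getD 0

-- ===== PORT B =====
def countGoodRectangles_alt (rectangles : List (List Int)) : Int :=
  let sides := rectangles.map (fun r => (PySem.List.min? r (fun x => x)).getD 0)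
  let m := (PySem.List.max? sides (fun x => x)).getD 0
  (PySem.List.count sides m : Int)

-- ===== PRECONDITION & SPEC =====
-- Pre_ is exactly the set on which Python A returns normally: every rectangle nonempty
-- (min([]) is a ValueError) and the first square side ≥ -1 exists and is ≥ 0 — otherwise
-- 'total' is used or returned while unbound (UnboundLocalError).  (Implies rectangles ≠ [].)
def Pre_countGoodRectangles (rectangles : List (List Int)) : Prop :=
  (∀ r ∈ rectangles, r ≠ []) ∧
  0 ≤ (((rectangles.map (fun r => (PySem.List.min? r (fun x => x)).getD 0)).find?
        (fun s => decide (-1 ≤ s))).getD (-2))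
instance (rectangles : List (List Int)) : Decidable (Pre_countGoodRectangles rectangles) := by
  unfold Pre_countGoodRectangles; infer_instance
def pvWitness_countGoodRectangles : List (List Int) := [[2,3],[3,7],[4,3],[3,7]]

def Spec_countGoodRectangles (rectangles : List (List Int)) (out : Int) : Prop := out = countGoodRectangles_alt rectangles
instance (rectangles : List (List Int)) (out : Int) : Decidable (Spec_countGoodRectangles rectangles out) := by unfold Spec_countGoodRectangles; infer_instance

-- ===== CLAIM (what is proved, stated in full; the proofs are below) =====
def Claim_equal_countGoodRectangles : Prop := ∀ (rectangles : List (List Int)), Dom_countGoodRectangles rectangles → Pre_countGoodRectangles rectangles → Spec_countGoodRectangles rectangles (countGoodRectangles rectangles)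

-- ===== LEMMAS AND PROOFS =====

-- A's loop body, as a function of the current state and the current square side.
def pvStep (st : Int × Option Int) (t : Int) : Int × Option Int :=
  if t > st.1 then (t, some 1)
  else if t = st.1 then (st.1, st.2.map (· + 1))
  else st

lemma pvPrefix (p : List Int) (hp : ∀ x ∈ p, x < -1) :
    p.foldl pvStep (-1, none) = (-1, none) := by
  induction p with
  | nil => rfl
  | cons a l ih =>
    have ha := hp a (by simp)
    have : pvStep (-1, none) a = (-1, none) := by
      unfold pvStep; split_ifs with h1 h2 <;> [omega; omega; rfl]
    simp only [List.foldl_cons, this]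
    exact ih (fun x hx => hp x (by simp [hx]))

lemma pvLoopSome (l : List Int) : ∀ (m c : Int),
    l.foldl pvStep (m, some c) =
      (l.foldl max m,
       some (if l.foldl max m = m then c + (l.count m : Int)
             else (l.count (l.foldl max m) : Int))) := by
  induction l with
  | nil => intro m c; simp
  | cons a l ih =>
    intro m c
    have hmax := PySem.List.le_foldl_max l a
    have hmax' := PySem.List.le_foldl_max l m
    simp only [List.foldl_cons]
    by_cases h1 : a > m
    · have hstep : pvStep (m, some c) a = (a, some 1) := by
        unfold pvStep; simp [h1]
      have hM : max m a = a := by omega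
      rw [hstep, ih a 1, hM]
      have hMm : l.foldl max a ≠ m := by omega
      by_cases h2 : l.foldl max a = a <;>
        simp_all [List.count_cons] <;> omega
    · by_cases h2 : a = m
      · have hstep : pvStep (m, some c) a = (m, some (c + 1)) := by
          unfold pvStep; simp [h1, h2]
        have hM : max m a = m := by omega
        rw [hstep, ih m (c + 1), hM]
        by_cases h3 : l.foldl max m = m <;>
          simp_all [List.count_cons] <;> omega
      · have hstep : pvStep (m, some c) a = (m, some c) := by
          unfold pvStep; simp [h1, h2]
        have hM : max m a = m := by omega
        rw [hstep, ih m c, hM]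
        have hna : l.foldl max m ≠ a := by omega
        by_cases h3 : l.foldl max m = m <;>
          simp_all [List.count_cons] <;> omega

lemma pvFindDecomp {l : List Int} {v : Int}
    (h : l.find? (fun s => decide (-1 ≤ s)) = some v) :
    ∃ p rest, l = p ++ v :: rest ∧ ∀ x ∈ p, x < -1 := by
  induction l with
  | nil => simp at h
  | cons a l ih =>
    rw [List.find?_cons] at h
    by_cases ha : (-1 : Int) ≤ a
    · simp [ha] at h
      exact ⟨[], l, by simp [h], by simp⟩
    · simp [ha] at h
      obtain ⟨p, rest, hl, hp⟩ := ih h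
      exact ⟨a :: p, rest, by simp [hl], by
        intro x hx
        rcases List.mem_cons.1 hx with rfl | hx
        · omega
        · exact hp x hx⟩

theorem pvMainEq (rectangles : List (List Int))
    (hpre : Pre_countGoodRectangles rectangles) :
    countGoodRectangles rectangles = countGoodRectangles_alt rectangles := by
  obtain ⟨-, hfind⟩ := hpre
  set side := fun r : List Int => (PySem.List.min? r (fun x => x)).getD 0 with hside
  set sides := rectangles.map side with hsides
  -- extract the found first side ≥ -1
  rcases hf : sides.find? (fun s => decide (-1 ≤ s)) with _ | v
  · rw [hsides, hside, hf] at hfind; simp at hfind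
  rw [hsides, hside, hf] at hfind
  simp only [Option.getD_some] at hfind
  obtain ⟨p, rest, hl, hp⟩ := pvFindDecomp hf
  -- A as a fold over sides
  have hA : countGoodRectangles rectangles
      = ((sides.foldl pvStep (-1, none)).2).getD 0 := by
    show ((rectangles.foldl (fun st i => pvStep st (side i)) (-1, none)).2).getD 0
        = ((sides.foldl pvStep (-1, none)).2).getD 0
    rw [hsides, List.foldl_map]
  set M := rest.foldl max v with hM
  have hrest := PySem.List.le_foldl_max rest v
  -- A's value
  have hAval : countGoodRectangles rectangles = ((v :: rest).count M : Int) := by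
    rw [hA, hl, List.foldl_append, pvPrefix p hp, List.foldl_cons]
    have hstep : pvStep (-1, none) v = (v, some 1) := by
      unfold pvStep; simp only []
      rw [if_pos (show v > (-1 : Int) by omega)]
    rw [hstep, pvLoopSome rest v 1]
    by_cases h3 : M = v
    · simp [← hM, h3]; omega
    · simp [← hM, h3, Ne.symm h3]
  -- B's max is M
  have hMfull : PySem.List.max? sides (fun x => x) = some M := by
    rcases hmax : PySem.List.max? sides (fun x => x) with _ | w
    · rw [PySem.List.max?_eq_none_iff] at hmax
      rw [hmax] at hl; simp at hl
    · have hwmem : w ∈ sides := PySem.List.max?_mem hmax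
      have hwmaxM : w ≤ M := by
        rw [hl] at hwmem
        rcases List.mem_append.1 hwmem with hw | hw
        · have := hp w hw; omega
        · rcases List.mem_cons.1 hw with rfl | hw
          · omega
          · exact hrest.2 w hw
      have hMmem : M ∈ sides := by
        rw [hl]
        rcases PySem.List.foldl_max_mem rest v with h | h
        · rw [← hM] at *; exact List.mem_append.2 (Or.inr (by simp [h]))
        · rw [← hM] at *; exact List.mem_append.2 (Or.inr (by simp [h]))
      have hMw : M ≤ w := PySem.List.max?_isMax hmax M hMmem
      exact congrArg some (le_antisymm hwmaxM hMw)
  -- B's value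
  have hBval : countGoodRectangles_alt rectangles = (sides.count M : Int) := by
    show ((PySem.List.count sides (((PySem.List.max? sides (fun x => x)).getD 0)) : Nat) : Int)
        = (sides.count M : Int)
    rw [hMfull, Option.getD_some, PySem.List.count_eq]
  -- prefix carries no occurrence of M
  have hcount : sides.count M = (v :: rest).count M := by
    rw [hl, List.count_append]
    have : p.count M = 0 := by
      rw [List.count_eq_zero]
      intro hmem
      have := hp M hmem; omega
    omega
  rw [hAval, hBval, hcount]

-- ===== VERDICT (by name: the statement is the Claim_ definition above) =====
theorem countGoodRectangles_spec : Claim_equal_countGoodRectangles := by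
  intro rectangles _ hpre
  unfold Spec_countGoodRectangles
  exact pvMainEq rectangles hpre
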